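-- pv_equiv track=rewrite | github.com/druarnfield/Unmdx | src/unmdx_v2/core/dax_generator.py | _generate_with_dimensions
-- ===== SOURCE A (Python) =====
-- from typing import Dict, List, Optional, Any
--
-- def _generate_with_dimensions(measures: List[str], dimensions: List[Dict[str, str]]) -> str:
--     """
--     Generate DAX for queries with dimensions.
--
--     Format:
--     EVALUATE
--     SUMMARIZECOLUMNS(
--         Table[Column],
--         "MeasureName", [MeasureName]
--     )
--     """
--     dax_parts = ["EVALUATE", "SUMMARIZECOLUMNS("]
--
--     # Add dimensions (only include those that need to be in SUMMARIZECOLUMNS)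
--     for dimension in dimensions:
--         table = dimension["table"]
--         column = dimension["column"]
--
--         # Skip specific member dimensions - they will be handled as filters
--         if dimension.get("selection_type") == "specific":
--             continue
--
--         # Handle special cases for table names with spaces or reserved words
--         # Quote table names that contain spaces, or are reserved words like 'Date'
--         if " " in table or table.lower() in ["date", "time"]:
--             table_ref = f"'{table}'[{column}]"
--         else:
--             table_ref = f"{table}[{column}]"
--
--         dax_parts.append(f"    {table_ref},")
--
--     # Add measures
--     for measure in measures:
--         dax_parts.append(f'    "{measure}", [{measure}],')
--
--     # Remove the last comma and close the function
--     if dax_parts[-1].endswith(","):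
--         dax_parts[-1] = dax_parts[-1][:-1]
--
--     dax_parts.append(")")
--
--     return "\n".join(dax_parts)
-- ===== SOURCE B (Python) =====
-- from typing import Dict, List
--
-- def _generate_with_dimensions(measures: List[str], dimensions: List[Dict[str, str]]) -> str:
--     # One merged work list, then a recursion that renders the body back-to-front,
--     # placing ",\n" before the already-rendered tail only when that tail is non-empty.
--     items = [("dim", d) for d in dimensions] + [("meas", m) for m in measures]
--
--     def render(rest):
--         if not rest:
--             return ""
--         kind, x = rest[0]
--         tail = render(rest[1:])
--         if kind == "dim":
--             if x.get("selection_type") == "specific":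
--                 return tail
--             table = x["table"]
--             column = x["column"]
--             quoted = "'" + table + "'" if " " in table or table.lower() in ("date", "time") else table
--             head = quoted + "[" + column + "]"
--         else:
--             head = '"' + x + '", [' + x + "]"
--         return "    " + head + (",\n" + tail if tail else "")
--
--     body = render(items)
--     return "EVALUATE\nSUMMARIZECOLUMNS(\n" + (body + "\n" if body else "") + ")"
-- ===== Notes on version B (the rewrite author's own statement) =====
-- stated objective: alternative
-- what changed: B merges dimensions and measures into one tagged work list and renders the body with a single recursion that builds the string back-to-front, deciding comma placement by whether the already-rendered tail is empty, instead of A's two sequential append loops over a line list followed by mutating the last line to strip its trailing comma.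
import Mathlib
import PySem

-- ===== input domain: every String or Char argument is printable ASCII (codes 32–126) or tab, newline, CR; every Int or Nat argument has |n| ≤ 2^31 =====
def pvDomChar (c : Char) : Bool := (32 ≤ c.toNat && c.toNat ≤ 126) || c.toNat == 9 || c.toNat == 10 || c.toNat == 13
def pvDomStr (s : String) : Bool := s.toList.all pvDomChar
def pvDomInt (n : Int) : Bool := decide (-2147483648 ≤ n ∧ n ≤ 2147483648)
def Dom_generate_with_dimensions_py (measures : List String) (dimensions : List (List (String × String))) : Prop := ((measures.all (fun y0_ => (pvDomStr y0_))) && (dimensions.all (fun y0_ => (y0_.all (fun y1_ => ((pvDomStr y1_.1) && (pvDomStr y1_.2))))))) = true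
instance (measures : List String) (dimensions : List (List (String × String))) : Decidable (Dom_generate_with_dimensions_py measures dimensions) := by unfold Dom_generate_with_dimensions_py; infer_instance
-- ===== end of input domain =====

-- B renders the body by one recursion over a merged tagged work list, placing "," before the
-- rendered tail only when it is non-empty, instead of A's two append loops plus last-line comma
-- stripping (objective: alternative).

-- ===== PORT A =====
def generate_with_dimensions_py (measures : List String) (dimensions : List (List (String × String))) : String :=
  let dax_parts : List String := ["EVALUATE", "SUMMARIZECOLUMNS("]
  let dax_parts := dimensions.foldl (fun dax_parts dimension =>
    let d := PySem.Dict.ofList dimension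
    let table := (PySem.Dict.get? d "table").getD ""      -- KeyError (key absent) excluded by Pre_
    let column := (PySem.Dict.get? d "column").getD ""    -- KeyError (key absent) excluded by Pre_
    if PySem.Dict.get? d "selection_type" == some "specific" then dax_parts
    else
      let table_ref := if PySem.Str.isIn " " table || ["date", "time"].contains (PySem.Str.lower table)
        then "'" ++ table ++ "'[" ++ column ++ "]"
        else table ++ "[" ++ column ++ "]"
      dax_parts ++ ["    " ++ table_ref ++ ","]) dax_parts
  let dax_parts := measures.foldl (fun dax_parts measure =>
    dax_parts ++ ["    \"" ++ measure ++ "\", [" ++ measure ++ "],"]) dax_parts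
  let last := (PySem.List.pyGet? dax_parts (-1)).getD ""   -- dax_parts is never empty
  let dax_parts := if PySem.Str.endswith last ","
    then dax_parts.dropLast ++ [PySem.Str.slice last none (some (-1))]
    else dax_parts
  PySem.Str.join "\n" (dax_parts ++ [")"])

-- ===== PORT B =====
-- the tagged work item ("dim", d) / ("meas", m): Sum carries the tag
def pvRender (rest : List (Sum (List (String × String)) String)) : String :=
  match rest with
  | [] => ""
  | x :: rest' =>
    let tail := pvRender rest'
    match x with
    | .inl dim =>
      let d := PySem.Dict.ofList dim
      if PySem.Dict.get? d "selection_type" == some "specific" then tail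
      else
        let table := (PySem.Dict.get? d "table").getD ""     -- KeyError excluded by Pre_
        let column := (PySem.Dict.get? d "column").getD ""   -- KeyError excluded by Pre_
        let quoted := if PySem.Str.isIn " " table || ["date", "time"].contains (PySem.Str.lower table)
          then "'" ++ table ++ "'" else table
        let head := quoted ++ "[" ++ column ++ "]"
        "    " ++ head ++ (if tail == "" then "" else ",\n" ++ tail)
    | .inr m =>
        let head := "\"" ++ m ++ "\", [" ++ m ++ "]"
        "    " ++ head ++ (if tail == "" then "" else ",\n" ++ tail)

def generate_with_dimensions_py_alt (measures : List String) (dimensions : List (List (String × String))) : String :=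
  let items : List (Sum (List (String × String)) String) :=
    dimensions.map Sum.inl ++ measures.map Sum.inr
  let body := pvRender items
  "EVALUATE\nSUMMARIZECOLUMNS(\n" ++ (if body == "" then "" else body ++ "\n") ++ ")"

-- ===== PRECONDITION & SPEC =====
-- Pre_ excludes exactly the dimension dicts missing a "table" or "column" key, on which the Python A raises KeyError.
def Pre_generate_with_dimensions_py (measures : List String) (dimensions : List (List (String × String))) : Prop :=
  ∀ d ∈ dimensions, "table" ∈ d.map Prod.fst ∧ "column" ∈ d.map Prod.fst
instance (measures : List String) (dimensions : List (List (String × String))) : Decidable (Pre_generate_with_dimensions_py measures dimensions) := by unfold Pre_generate_with_dimensions_py; infer_instance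
def pvWitness_generate_with_dimensions_py : List String × (List (List (String × String))) :=
  (["Total Sales"], [[("table", "Products"), ("column", "Category")], [("table", "Date"), ("column", "Year"), ("selection_type", "specific")]])

def Spec_generate_with_dimensions_py (measures : List String) (dimensions : List (List (String × String))) (out : String) : Prop := out = generate_with_dimensions_py_alt measures dimensions
instance (measures : List String) (dimensions : List (List (String × String))) (out : String) : Decidable (Spec_generate_with_dimensions_py measures dimensions out) := by unfold Spec_generate_with_dimensions_py; infer_instance

-- ===== CLAIM (what is proved, stated in full; the proofs are below) =====
def Claim_equal_generate_with_dimensions_py : Prop := ∀ (measures : List String) (dimensions : List (List (String × String))), Dom_generate_with_dimensions_py measures dimensions → Pre_generate_with_dimensions_py measures dimensions → Spec_generate_with_dimensions_py measures dimensions (generate_with_dimensions_py measures dimensions)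

-- ===== LEMMAS AND PROOFS =====

def pvKeep (dimension : List (String × String)) : Bool :=
  !(PySem.Dict.get? (PySem.Dict.ofList dimension) "selection_type" == some "specific")

def pvRef (dimension : List (String × String)) : String :=
  let d := PySem.Dict.ofList dimension
  let table := (PySem.Dict.get? d "table").getD ""
  let column := (PySem.Dict.get? d "column").getD ""
  if PySem.Str.isIn " " table || ["date", "time"].contains (PySem.Str.lower table)
    then "'" ++ table ++ "'[" ++ column ++ "]"
    else table ++ "[" ++ column ++ "]"

def pvMEntry (m : String) : String := "\"" ++ m ++ "\", [" ++ m ++ "]"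

-- the common normal form both proofs reduce to: the entry list, joined as a body
def pvBody : List String → String
  | [] => ""
  | e :: es => "    " ++ e ++ (if es = [] then "" else ",\n" ++ pvBody es)

theorem pvBody_cons_ne (e : String) (es : List String) : pvBody (e :: es) ≠ "" := by
  intro h
  have := congrArg String.toList h
  simp [pvBody] at this

theorem pvBody_beq (e : String) (es : List String) : (pvBody (e :: es) == "") = false := by
  rw [beq_eq_false_iff_ne]; exact pvBody_cons_ne e es

theorem pvBody_if (R : List String) :
    (if pvBody R == "" then "" else ",\n" ++ pvBody R)
      = (if R = [] then "" else ",\n" ++ pvBody R) := by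
  cases R with
  | nil => simp [pvBody]
  | cons e es => rw [pvBody_beq]; simp

-- ---- B side: pvRender computes pvBody of the filtered entry list ----

theorem pvRender_measures (ms : List String) :
    pvRender (ms.map Sum.inr) = pvBody (ms.map pvMEntry) := by
  induction ms with
  | nil => rfl
  | cons m ms ih =>
    simp only [List.map_cons, pvRender, ih, pvBody_if]
    simp [pvBody, pvMEntry]

theorem pvRef_eq (dim : List (String × String)) :
    (let d := PySem.Dict.ofList dim
     let table := (PySem.Dict.get? d "table").getD ""
     let column := (PySem.Dict.get? d "column").getD ""
     (if PySem.Str.isIn " " table || ["date", "time"].contains (PySem.Str.lower table)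
        then "'" ++ table ++ "'" else table) ++ "[" ++ column ++ "]") = pvRef dim := by
  simp only [pvRef]
  split <;> rw [← String.toList_inj] <;> simp

theorem pvRender_eq (ds : List (List (String × String))) (ms : List String) :
    pvRender (ds.map Sum.inl ++ ms.map Sum.inr)
      = pvBody ((ds.filter pvKeep).map pvRef ++ ms.map pvMEntry) := by
  induction ds with
  | nil => simpa using pvRender_measures ms
  | cons d ds ih =>
    simp only [List.map_cons, List.cons_append, pvRender, ih, List.filter_cons]
    by_cases h : pvKeep d = true
    · have hs : ¬(PySem.Dict.get? (PySem.Dict.ofList d) "selection_type" == some "specific") = true := by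
        simp [pvKeep] at h; simp [h]
      rw [if_neg hs, if_pos h, pvRef_eq d]
      simp only [List.map_cons, List.cons_append, pvBody_if]
      simp [pvBody]
    · have hs : (PySem.Dict.get? (PySem.Dict.ofList d) "selection_type" == some "specific") = true := by
        simpa [pvKeep] using h
      rw [if_pos hs, if_neg h]

-- ---- A side (loop shapes) ----

theorem pv_foldl_skip {α β : Type} (c : α → Bool) (f : α → β) (l : List α) (acc : List β) :
    l.foldl (fun acc x => if c x then acc else acc ++ [f x]) acc
      = acc ++ (l.filter (fun x => !c x)).map f := by
  induction l generalizing acc with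
  | nil => simp
  | cons a l ih =>
    by_cases h : c a <;> simp [List.foldl_cons, h, ih]

theorem pv_foldA_dims (dimensions : List (List (String × String))) (acc : List String) :
    dimensions.foldl (fun dax_parts dimension =>
      let d := PySem.Dict.ofList dimension
      let table := (PySem.Dict.get? d "table").getD ""
      let column := (PySem.Dict.get? d "column").getD ""
      if PySem.Dict.get? d "selection_type" == some "specific" then dax_parts
      else
        let table_ref := if PySem.Str.isIn " " table || ["date", "time"].contains (PySem.Str.lower table)
          then "'" ++ table ++ "'[" ++ column ++ "]"
          else table ++ "[" ++ column ++ "]"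
        dax_parts ++ ["    " ++ table_ref ++ ","]) acc
    = acc ++ (dimensions.filter pvKeep).map (fun d => "    " ++ pvRef d ++ ",") := by
  simpa [pvKeep, pvRef] using
    pv_foldl_skip (fun d => PySem.Dict.get? (PySem.Dict.ofList d) "selection_type" == some "specific")
      (fun d => "    " ++ pvRef d ++ ",") dimensions acc

theorem pv_mEntry_eq (m : String) :
    "    \"" ++ m ++ "\", [" ++ m ++ "]," = "    " ++ pvMEntry m ++ "," := by
  rw [← String.toList_inj]
  simp [pvMEntry, show "    \"".toList = "    ".toList ++ "\"".toList from by decide,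
        show "],".toList = "]".toList ++ ",".toList from by decide]

theorem pv_join_cons_ne (sep p : List Char) (L : List (List Char)) (h : L ≠ []) :
    PySem.Chars.join sep (p :: L) = p ++ sep ++ PySem.Chars.join sep L := by
  cases L with
  | nil => simp at h
  | cons q t => exact PySem.Chars.join_cons_cons sep p q t

theorem pv_join_strip (z r : List Char) (zs : List (List Char)) :
    PySem.Chars.join ['\n'] (zs.map (· ++ [',']) ++ [z] ++ [r])
      = PySem.Chars.join ['\n'] ([PySem.Chars.join [',', '\n'] (zs ++ [z])] ++ [r]) := by
  induction zs with
  | nil => simp [PySem.Chars.join_cons_cons, PySem.Chars.join_singleton]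
  | cons a zs ih =>
    rw [List.map_cons, List.cons_append, List.cons_append,
        pv_join_cons_ne _ _ _ (by simp), ih,
        List.cons_append, pv_join_cons_ne _ _ _ (by simp),
        List.singleton_append, PySem.Chars.join_cons_cons]
    rw [show (a :: zs ++ [z]) = a :: (zs ++ [z]) from rfl,
        pv_join_cons_ne [',', '\n'] a (zs ++ [z]) (by simp)]
    simp

theorem pv_char (zs : List (List Char)) (z r e1 e2 : List Char) :
    PySem.Chars.join ['\n'] (e1 :: e2 :: (zs.map (· ++ [',']) ++ [z] ++ [r]))
      = PySem.Chars.join ['\n'] (e1 :: e2 :: ([PySem.Chars.join [',', '\n'] (zs ++ [z])] ++ [r])) := by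
  rw [pv_join_cons_ne _ e1 _ (by simp), pv_join_cons_ne _ e1 _ (by simp),
      pv_join_cons_ne _ e2 _ (by simp), pv_join_cons_ne _ e2 _ (by simp), pv_join_strip]

theorem pv_endswith_comma (s : String) : PySem.Str.endswith (s ++ ",") "," = true := by
  simp [PySem.Str.endswith_eq, PySem.Chars.endswith_iff]

theorem pv_slice_comma (s : String) : PySem.Str.slice (s ++ ",") none (some (-1)) = s := by
  rw [← String.toList_inj]; simp [PySem.List.slice_to_neg_one]

theorem pv_tail (E : List String) :
    (PySem.Str.join "\n"
      ((if PySem.Str.endswith ((PySem.List.pyGet?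
              (["EVALUATE", "SUMMARIZECOLUMNS("] ++ E.map (fun e => "    " ++ e ++ ",")) (-1)).getD "") ","
        then (["EVALUATE", "SUMMARIZECOLUMNS("] ++ E.map (fun e => "    " ++ e ++ ",")).dropLast
              ++ [PySem.Str.slice ((PySem.List.pyGet?
                    (["EVALUATE", "SUMMARIZECOLUMNS("] ++ E.map (fun e => "    " ++ e ++ ",")) (-1)).getD "")
                    none (some (-1))]
        else ["EVALUATE", "SUMMARIZECOLUMNS("] ++ E.map (fun e => "    " ++ e ++ ",")) ++ [")"]))
    = PySem.Str.join "\n"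
      ((if E.isEmpty then ["EVALUATE", "SUMMARIZECOLUMNS("]
        else ["EVALUATE", "SUMMARIZECOLUMNS("] ++ [PySem.Str.join ",\n" (E.map (fun e => "    " ++ e))]) ++ [")"]) := by
  rcases E.eq_nil_or_concat with rfl | ⟨zs, z, rfl⟩
  · decide
  · simp only [List.concat_eq_append]
    have hmap : (zs ++ [z]).map (fun e => "    " ++ e ++ ",")
        = zs.map (fun e => "    " ++ e ++ ",") ++ [("    " ++ z) ++ ","] := by
      simp [String.append_assoc]
    rw [hmap, ← List.append_assoc, PySem.List.pyGet?_neg_one_append_singleton,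
        Option.getD_some, pv_endswith_comma, if_pos rfl, pv_slice_comma, List.dropLast_concat]
    rw [show (zs ++ [z]).isEmpty = false from by simp, if_neg (by simp)]
    rw [← String.toList_inj, PySem.Str.toList_join, PySem.Str.toList_join,
        show ("\n".toList) = ['\n'] from by decide]
    have h1 : ((["EVALUATE", "SUMMARIZECOLUMNS("] ++ zs.map (fun e => "    " ++ e ++ ",")
          ++ ["    " ++ z]) ++ [")"]).map String.toList
        = "EVALUATE".toList :: "SUMMARIZECOLUMNS(".toList ::
            (((zs.map (fun e => "    " ++ e)).map String.toList).map (· ++ [','])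
              ++ [("    " ++ z).toList] ++ [")".toList]) := by
      simp [List.map_map, Function.comp_def, show ",".toList = [','] from by decide]
    have h2 : ((["EVALUATE", "SUMMARIZECOLUMNS("]
          ++ [PySem.Str.join ",\n" ((zs ++ [z]).map (fun e => "    " ++ e))]) ++ [")"]).map String.toList
        = "EVALUATE".toList :: "SUMMARIZECOLUMNS(".toList ::
            ([PySem.Chars.join [',', '\n']
                ((zs.map (fun e => "    " ++ e)).map String.toList ++ [("    " ++ z).toList])] ++ [")".toList]) := by
      simp [PySem.Str.toList_join, List.map_map, Function.comp_def,
            show ",\n".toList = [',', '\n'] from by decide]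
    rw [h1, h2]
    exact pv_char _ _ _ _ _

-- ---- bridge: the joined form equals B's body form ----

theorem pvBody_eq_join (E : List String) :
    pvBody E = PySem.Str.join ",\n" (E.map (fun e => "    " ++ e)) := by
  induction E with
  | nil => rw [← String.toList_inj]; simp [pvBody, PySem.Str.toList_join, PySem.Chars.join_nil]
  | cons e es ih =>
    cases es with
    | nil =>
      rw [← String.toList_inj]
      simp [pvBody, PySem.Str.toList_join, PySem.Chars.join_singleton]
    | cons e' es' =>
      rw [show pvBody (e :: e' :: es') = "    " ++ e ++ (",\n" ++ pvBody (e' :: es')) from by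
            simp [pvBody], ih]
      rw [← String.toList_inj]
      simp [PySem.Str.toList_join, PySem.Chars.join_cons_cons,
            show ",\n".toList = [',', '\n'] from by decide]

theorem pv_B_join (E : List String) :
    PySem.Str.join "\n"
      ((if E.isEmpty then ["EVALUATE", "SUMMARIZECOLUMNS("]
        else ["EVALUATE", "SUMMARIZECOLUMNS("] ++ [PySem.Str.join ",\n" (E.map (fun e => "    " ++ e))]) ++ [")"])
    = "EVALUATE\nSUMMARIZECOLUMNS(\n" ++ (if pvBody E == "" then "" else pvBody E ++ "\n") ++ ")" := by
  cases E with
  | nil => decide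
  | cons e es =>
    rw [show (e :: es).isEmpty = false from rfl, if_neg (by simp), pvBody_beq, if_neg (by simp),
        ← pvBody_eq_join]
    rw [← String.toList_inj]
    simp [PySem.Str.toList_join, PySem.Chars.join_cons_cons, PySem.Chars.join_singleton,
          show "EVALUATE\nSUMMARIZECOLUMNS(\n".toList
            = "EVALUATE".toList ++ '\n' :: "SUMMARIZECOLUMNS(".toList ++ ['\n'] from by decide,
          show "\n".toList = ['\n'] from by decide]

theorem pv_main (measures : List String) (dimensions : List (List (String × String))) :
    generate_with_dimensions_py measures dimensions
      = generate_with_dimensions_py_alt measures dimensions := by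
  rw [generate_with_dimensions_py, generate_with_dimensions_py_alt]
  simp only [pv_foldA_dims, PySem.List.foldl_append_singleton_eq_map, pv_mEntry_eq, pvRender_eq]
  have hA : ["EVALUATE", "SUMMARIZECOLUMNS("]
        ++ (dimensions.filter pvKeep).map (fun d => "    " ++ pvRef d ++ ",")
        ++ measures.map (fun m => "    " ++ pvMEntry m ++ ",")
      = ["EVALUATE", "SUMMARIZECOLUMNS("]
        ++ ((dimensions.filter pvKeep).map pvRef ++ measures.map pvMEntry).map (fun e => "    " ++ e ++ ",") := by
    simp [List.map_map, Function.comp_def]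
  rw [hA, pv_tail ((dimensions.filter pvKeep).map pvRef ++ measures.map pvMEntry)]
  exact pv_B_join ((dimensions.filter pvKeep).map pvRef ++ measures.map pvMEntry)

-- ===== VERDICT (by name: the statement is the Claim_ definition above) =====
theorem generate_with_dimensions_py_spec : Claim_equal_generate_with_dimensions_py := by
  intro measures dimensions _ _
  exact pv_main measures dimensions
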